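-- pv_equiv track=rewrite | github.com/pm4py/pm4py-core | pm4py/algo/discovery/dfg/utils/dfg_utils.py | max_occ_among_specif_activ
-- ===== SOURCE A (Python) =====
-- def get_outgoing_edges(dfg):
--     """
--     Gets outgoing edges of the provided DFG graph
--     """
--     outgoing = {}
--     for el in dfg:
--         if type(el[0]) is str:
--             if not el[0] in outgoing:
--                 outgoing[el[0]] = {}
--             outgoing[el[0]][el[1]] = dfg[el]
--         else:
--             if not el[0][0] in outgoing:
--                 outgoing[el[0][0]] = {}
--             outgoing[el[0][0]][el[0][1]] = el[1]
--     return outgoing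
--
-- def get_ingoing_edges(dfg):
--     """
--     Get ingoing edges of the provided DFG graph
--     """
--     ingoing = {}
--     for el in dfg:
--         if type(el[0]) is str:
--             if not el[1] in ingoing:
--                 ingoing[el[1]] = {}
--             ingoing[el[1]][el[0]] = dfg[el]
--         else:
--             if not el[0][1] in ingoing:
--                 ingoing[el[0][1]] = {}
--             ingoing[el[0][1]][el[0][0]] = el[1]
--     return ingoing
--
-- def sum_ingoutg_val_activ(dict, activity):
--     """
--     Gets the sum of ingoing/outgoing values of an activity
--
--     Parameters
--     -----------
--     dict
--         Dictionary
--     activity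
--         Current examined activity
--
--     Returns
--     -----------
--     sum
--     """
--     sum = 0
--     for act2 in dict[activity]:
--         sum += dict[activity][act2]
--     return sum
--
-- def max_occ_among_specif_activ(dfg, activities):
--     """
--     Get maximum ingoing/outgoing sum of values related to attributes in DFG graph
--     (here attributes to consider are specified)
--     """
--     ingoing = get_ingoing_edges(dfg)
--     outgoing = get_outgoing_edges(dfg)
--     max_value = -1
--
--     for act in activities:
--         if act in ingoing:
--             sum = sum_ingoutg_val_activ(ingoing, act)
--             if sum > max_value:
--                 max_value = sum
--         if act in outgoing:
--             sum = sum_ingoutg_val_activ(outgoing, act)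
--             if sum > max_value:
--                 max_value = sum
--
--     return max_value
-- ===== SOURCE B (Python) =====
-- def max_occ_among_specif_activ(dfg, activities):
--     """
--     One pass over the DFG builds flat ingoing/outgoing sum maps,
--     then one pass over the activities takes the max.
--     """
--     in_sum = {}
--     out_sum = {}
--     for (src, trg), val in dfg.items():
--         in_sum[trg] = in_sum.get(trg, 0) + val
--         out_sum[src] = out_sum.get(src, 0) + val
--     max_value = -1
--     for act in activities:
--         v = in_sum.get(act)
--         if v is not None and v > max_value:
--             max_value = v
--         v = out_sum.get(act)
--         if v is not None and v > max_value:
--             max_value = v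
--     return max_value
-- ===== Notes on version B (the rewrite author's own statement) =====
-- stated objective: faster
-- what changed: Replaces A's two nested per-node edge dicts plus a per-activity re-summing helper by two flat ingoing/outgoing sum dicts accumulated in a single pass over the DFG, then a plain max scan over the activities.
import Mathlib
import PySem

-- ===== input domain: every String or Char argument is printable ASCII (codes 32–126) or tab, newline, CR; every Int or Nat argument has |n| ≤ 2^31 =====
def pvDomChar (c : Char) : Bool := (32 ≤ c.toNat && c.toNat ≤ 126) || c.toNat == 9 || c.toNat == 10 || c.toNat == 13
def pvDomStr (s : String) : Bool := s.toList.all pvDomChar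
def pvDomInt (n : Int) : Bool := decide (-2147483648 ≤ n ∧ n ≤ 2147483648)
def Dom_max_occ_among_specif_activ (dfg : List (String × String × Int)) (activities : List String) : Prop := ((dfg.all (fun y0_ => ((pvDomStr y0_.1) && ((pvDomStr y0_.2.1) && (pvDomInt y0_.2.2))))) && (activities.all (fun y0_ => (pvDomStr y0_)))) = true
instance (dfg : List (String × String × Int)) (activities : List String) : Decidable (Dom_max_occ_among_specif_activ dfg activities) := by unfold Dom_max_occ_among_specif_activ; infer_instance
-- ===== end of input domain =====

-- B replaces A's nested per-node dicts and per-activity re-summing by flat ingoing/outgoing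
-- sum maps built in one pass over the DFG (simpler control flow; one pass instead of re-summing).


-- The Python argument `dfg` is a dict[(str,str), int]; its assoc-list encoding is turned
-- back into the dict (insertion order, last write wins) before either port runs.
def pvEdges (dfg : List (String × String × Int)) : List ((String × String) × Int) :=
  (PySem.Dict.ofList (dfg.map (fun e => ((e.1, e.2.1), e.2.2)))).items

-- ===== PORT A =====
-- `if not k in d: d[k] = {}` followed by `d[k][j] = v` (both get_ingoing/get_outgoing bodies).
def pvAddEdge (d : PySem.Dict String (PySem.Dict String Int)) (k j : String) (v : Int) :
    PySem.Dict String (PySem.Dict String Int) :=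
  let d := if d.contains k then d else d.insert k PySem.Dict.empty
  d.insert k ((d.getD k PySem.Dict.empty).insert j v)

def get_ingoing_edges (dfg : List (String × String × Int)) :
    PySem.Dict String (PySem.Dict String Int) :=
  (pvEdges dfg).foldl (fun d p => pvAddEdge d p.1.2 p.1.1 p.2) PySem.Dict.empty

def get_outgoing_edges (dfg : List (String × String × Int)) :
    PySem.Dict String (PySem.Dict String Int) :=
  (pvEdges dfg).foldl (fun d p => pvAddEdge d p.1.1 p.1.2 p.2) PySem.Dict.empty

def sum_ingoutg_val_activ (d : PySem.Dict String (PySem.Dict String Int)) (activity : String) : Int :=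
  (d.getD activity PySem.Dict.empty).items.foldl (fun s p => s + p.2) 0

def max_occ_among_specif_activ (dfg : List (String × String × Int)) (activities : List String) : Int :=
  let ingoing := get_ingoing_edges dfg
  let outgoing := get_outgoing_edges dfg
  activities.foldl (fun max_value act =>
    let max_value :=
      if ingoing.contains act then
        let s := sum_ingoutg_val_activ ingoing act
        if s > max_value then s else max_value
      else max_value
    if outgoing.contains act then
      let s := sum_ingoutg_val_activ outgoing act
      if s > max_value then s else max_value
    else max_value) (-1)

-- ===== PORT B =====
def max_occ_among_specif_activ_alt (dfg : List (String × String × Int)) (activities : List String) : Int :=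
  let sums := (pvEdges dfg).foldl
    (fun (st : PySem.Dict String Int × PySem.Dict String Int) p =>
      (st.1.modify p.1.2 0 (· + p.2), st.2.modify p.1.1 0 (· + p.2)))
    (PySem.Dict.empty, PySem.Dict.empty)
  activities.foldl (fun max_value act =>
    let max_value :=
      match sums.1.get? act with
      | some v => if v > max_value then v else max_value
      | none => max_value
    match sums.2.get? act with
    | some v => if v > max_value then v else max_value
    | none => max_value) (-1)

-- ===== PRECONDITION & SPEC =====
def Spec_max_occ_among_specif_activ (dfg : List (String × String × Int)) (activities : List String) (out : Int) : Prop := out = max_occ_among_specif_activ_alt dfg activities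
instance (dfg : List (String × String × Int)) (activities : List String) (out : Int) : Decidable (Spec_max_occ_among_specif_activ dfg activities out) := by unfold Spec_max_occ_among_specif_activ; infer_instance

-- ===== CLAIM (what is proved, stated in full; the proofs are below) =====
def Claim_equal_max_occ_among_specif_activ : Prop := ∀ (dfg : List (String × String × Int)) (activities : List String), Dom_max_occ_among_specif_activ dfg activities → Spec_max_occ_among_specif_activ dfg activities (max_occ_among_specif_activ dfg activities)

-- ===== LEMMAS AND PROOFS =====

lemma pvAddEdge_contains (d : PySem.Dict String (PySem.Dict String Int)) (k j t : String) (v : Int) :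
    (pvAddEdge d k j v).contains t = (t == k || d.contains t) := by
  unfold pvAddEdge
  by_cases hc : d.contains k = true
  · simp [hc, PySem.Dict.contains_insert]
  · have hcf : d.contains k = false := by simpa using hc
    simp only [hcf, Bool.false_eq_true, if_false, PySem.Dict.contains_insert]
    cases h : (t == k) <;> simp

lemma pvAddEdge_getD (d : PySem.Dict String (PySem.Dict String Int)) (k j t : String) (v : Int) :
    (pvAddEdge d k j v).getD t PySem.Dict.empty
      = if t = k then (d.getD k PySem.Dict.empty).insert j v else d.getD t PySem.Dict.empty := by
  unfold pvAddEdge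
  by_cases hc : d.contains k = true
  · simp [hc, PySem.Dict.getD_insert]
  · have hcf : d.contains k = false := by simpa using hc
    simp only [hcf, Bool.false_eq_true, if_false, PySem.Dict.getD_insert]
    by_cases h : t = k
    · simp [h, PySem.Dict.getD_of_not_contains d _ hcf]
    · simp [h]

-- value sum of a dict, as A's sum_ingoutg loop computes it
lemma sumvals_insert_fresh (d : PySem.Dict String Int) (j : String) (v : Int)
    (h : d.contains j = false) :
    ((d.insert j v).items.foldl (fun s p => s + p.2) 0)
      = d.items.foldl (fun s p => s + p.2) 0 + v := by
  rw [PySem.Dict.items_insert_of_not_contains _ _ h, List.foldl_append]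
  rfl

-- Core invariant: A's nested dict (outer key f p.1, inner key g p.1) and B's flat sum map
-- agree on membership and on the value sum at every key, all along the fold.
lemma pvRel (f g : String × String → String)
    (hinj : ∀ a b : String × String, f a = f b → g a = g b → a = b)
    (l : List ((String × String) × Int))
    (d : PySem.Dict String (PySem.Dict String Int)) (m : PySem.Dict String Int)
    (hnd : (l.map (·.1)).Nodup)
    (hfresh : ∀ p ∈ l, (d.getD (f p.1) PySem.Dict.empty).contains (g p.1) = false)
    (hrel : ∀ act, d.contains act = m.contains act ∧
      (d.getD act PySem.Dict.empty).items.foldl (fun s p => s + p.2) 0 = m.getD act 0) :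
    ∀ act,
      (l.foldl (fun d p => pvAddEdge d (f p.1) (g p.1) p.2) d).contains act
        = (l.foldl (fun m p => m.modify (f p.1) 0 (· + p.2)) m).contains act ∧
      ((l.foldl (fun d p => pvAddEdge d (f p.1) (g p.1) p.2) d).getD act PySem.Dict.empty).items.foldl
          (fun s p => s + p.2) 0
        = (l.foldl (fun m p => m.modify (f p.1) 0 (· + p.2)) m).getD act 0 := by
  induction l generalizing d m with
  | nil => simpa using hrel
  | cons p tl ih =>
    simp only [List.map_cons, List.nodup_cons] at hnd
    simp only [List.foldl_cons]
    apply ih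
    · exact hnd.2
    · -- freshness is preserved
      intro q hq
      rw [pvAddEdge_getD]
      split
      · rename_i hfq
        rw [PySem.Dict.contains_insert]
        have hne : g q.1 ≠ g p.1 := by
          intro hg
          exact hnd.1 (by
            have : q.1 = p.1 := hinj _ _ hfq hg
            exact this ▸ List.mem_map_of_mem (hq))
        have hq' := hfresh q (List.mem_cons_of_mem _ hq)
        rw [hfq] at hq'
        simp [hne, hq']
      · exact hfresh q (List.mem_cons_of_mem _ hq)
    · -- the pointwise relation is preserved
      intro act
      constructor
      · rw [pvAddEdge_contains, PySem.Dict.contains_modify, (hrel act).1]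
      · rw [pvAddEdge_getD, PySem.Dict.getD_modify]
        split
        · rename_i h
          rw [sumvals_insert_fresh _ _ _ (h ▸ hfresh p (List.mem_cons_self))]
          rw [(hrel (f p.1)).2]
        · exact (hrel act).2

-- split B's simultaneous fold into its two component folds
lemma pvFoldPair (l : List ((String × String) × Int))
    (a b : PySem.Dict String Int) :
    l.foldl (fun (st : PySem.Dict String Int × PySem.Dict String Int) p =>
        (st.1.modify p.1.2 0 (· + p.2), st.2.modify p.1.1 0 (· + p.2))) (a, b)
      = (l.foldl (fun m p => m.modify p.1.2 0 (· + p.2)) a,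
         l.foldl (fun m p => m.modify p.1.1 0 (· + p.2)) b) := by
  induction l generalizing a b with
  | nil => rfl
  | cons p tl ih => simp [List.foldl_cons, ih]

lemma pvEdges_keys_nodup (dfg : List (String × String × Int)) :
    ((pvEdges dfg).map (·.1)).Nodup := by
  have := PySem.Dict.nodup_keys_ofList (dfg.map (fun e => ((e.1, e.2.1), e.2.2)))
  simpa [pvEdges, PySem.Dict.keys] using this

-- the two flat sum maps of port B
def pvInSum (dfg : List (String × String × Int)) : PySem.Dict String Int :=
  (pvEdges dfg).foldl (fun m p => m.modify p.1.2 0 (· + p.2)) PySem.Dict.empty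
def pvOutSum (dfg : List (String × String × Int)) : PySem.Dict String Int :=
  (pvEdges dfg).foldl (fun m p => m.modify p.1.1 0 (· + p.2)) PySem.Dict.empty

lemma pvIngoingRel (dfg : List (String × String × Int)) (act : String) :
    (get_ingoing_edges dfg).contains act = (pvInSum dfg).contains act ∧
    sum_ingoutg_val_activ (get_ingoing_edges dfg) act = (pvInSum dfg).getD act 0 := by
  exact pvRel (fun a => a.2) (fun a => a.1)
    (fun a b h2 h1 => Prod.ext h1 h2) (pvEdges dfg) _ _
    (pvEdges_keys_nodup dfg) (by intro p _; simp) (fun a => ⟨rfl, rfl⟩) act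

lemma pvOutgoingRel (dfg : List (String × String × Int)) (act : String) :
    (get_outgoing_edges dfg).contains act = (pvOutSum dfg).contains act ∧
    sum_ingoutg_val_activ (get_outgoing_edges dfg) act = (pvOutSum dfg).getD act 0 := by
  exact pvRel (fun a => a.1) (fun a => a.2)
    (fun a b h1 h2 => Prod.ext h1 h2) (pvEdges dfg) _ _
    (pvEdges_keys_nodup dfg) (by intro p _; simp) (fun a => ⟨rfl, rfl⟩) act

-- one side of the activity step: contains/sum view = get? view
lemma pvStepSide (d : PySem.Dict String (PySem.Dict String Int)) (m : PySem.Dict String Int)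
    (act : String) (mv : Int)
    (hc : d.contains act = m.contains act)
    (hs : sum_ingoutg_val_activ d act = m.getD act 0) :
    (if d.contains act then
        let s := sum_ingoutg_val_activ d act
        if s > mv then s else mv
      else mv)
    = (match m.get? act with
      | some v => if v > mv then v else mv
      | none => mv) := by
  cases hm : m.get? act with
  | none =>
    have : m.contains act = false := by
      rw [PySem.Dict.contains_eq_isSome_get?, hm]; rfl
    simp [hc, this]
  | some v =>
    have hct : m.contains act = true := by
      rw [PySem.Dict.contains_eq_isSome_get?, hm]; rfl
    have hv : m.getD act 0 = v := PySem.Dict.getD_of_get?_eq_some _ _ hm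
    simp [hc, hct, hs, hv]

-- ===== VERDICT (by name: the statement is the Claim_ definition above) =====
theorem max_occ_among_specif_activ_spec : Claim_equal_max_occ_among_specif_activ := by
  intro dfg activities _
  show _ = _
  unfold max_occ_among_specif_activ max_occ_among_specif_activ_alt
  rw [pvFoldPair]
  have hstep : ∀ (mv : Int) (act : String),
      (let max_value :=
        if (get_ingoing_edges dfg).contains act then
          let s := sum_ingoutg_val_activ (get_ingoing_edges dfg) act
          if s > mv then s else mv
        else mv
      if (get_outgoing_edges dfg).contains act then
        let s := sum_ingoutg_val_activ (get_outgoing_edges dfg) act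
        if s > max_value then s else max_value
      else max_value)
      = (let max_value :=
          match (pvInSum dfg).get? act with
          | some v => if v > mv then v else mv
          | none => mv
        match (pvOutSum dfg).get? act with
        | some v => if v > max_value then v else max_value
        | none => max_value) := by
    intro mv act
    rw [pvStepSide _ _ _ _ (pvIngoingRel dfg act).1 (pvIngoingRel dfg act).2]
    rw [pvStepSide _ _ _ _ (pvOutgoingRel dfg act).1 (pvOutgoingRel dfg act).2]
  exact List.foldl_ext _ _ _ (fun mv act _ => hstep mv act)
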